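-- pv_equiv track=rewrite | github.com/TaewooRiver/AirForce1 | OSAM_MOCK/Lv.1-1.py | solution
-- ===== SOURCE A (Python) =====
-- def compareAnswer(list, answer, n):
--     count = 0
--     for i in range(n):
--         if list[i] == answer[i]:
--             count += 1
--     return count
--
-- def solution(answers):
--     answer = []
--     fail_1 = []
--     fail_2 = []
--     fail_3 = []
--     length = len(answers)
--     while length > 0:
--         temp = 1
--         while temp <= 5:
--             fail_1.append(temp)
--             length -= 1
--             temp += 1
--
--     length = len(answers)
--     for i in range(length):
--         temp = 1
--         if (i%8) == 0 or (i%8) == 2 or (i%8) == 4 or (i%8) == 6 or i == 0: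
--             fail_2.append(2)
--         elif (i%8) == 1:
--             fail_2.append(1)
--         elif (i%8) == 3:
--             fail_2.append(3)
--         elif (i%8) == 5:
--             fail_2.append(4)
--         else:
--             fail_2.append(5)
--
--
--     for i in range(length):
--         if i == 0 or (i % 10) == 0 or (i % 10) == 1:
--             fail_3.append(3)
--         elif (i % 10) == 2 or (i % 10) == 3:
--             fail_3.append(1)
--         elif (i % 10) == 4 or (i % 10) == 5:
--             fail_3.append(2)
--         elif (i % 10) == 6 or (i % 10) == 7:
--             fail_3.append(4)
--         else:
--             fail_3.append(5)
--
--     correct_1 = compareAnswer(fail_1, answers, len(answers))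
--     correct_2 = compareAnswer(fail_2, answers, len(answers))
--     correct_3 = compareAnswer(fail_3, answers, len(answers))
--     res = [correct_1, correct_2, correct_3]
--
--     maximum = max(res)
--     if res[0] == maximum:
--         answer.append(1)
--     if res[1] == maximum:
--         answer.append(2)
--     if res[2] == maximum:
--         answer.append(3)
--
--
--
--     return answer
-- ===== SOURCE B (Python) =====
-- def solution(answers):
--     # All three guess patterns repeat with period dividing 40, so the expected
--     # guess at position i depends only on i % 40.  Build a frequency table of
--     # (i % 40, answer) pairs in one pass, then score each guesser by summing
--     # the table over the 40 residues at that guesser's expected value.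
--     freq = {}
--     for i, a in enumerate(answers):
--         k = (i % 40, a)
--         freq[k] = freq.get(k, 0) + 1
--     pats = [[1, 2, 3, 4, 5], [2, 1, 2, 3, 2, 4, 2, 5], [3, 3, 1, 1, 2, 2, 4, 4, 5, 5]]
--     scores = [sum(freq.get((r, p[r % len(p)]), 0) for r in range(40)) for p in pats]
--     m = max(scores)
--     return [g + 1 for g in range(3) if scores[g] == m]
-- ===== Notes on version B (the rewrite author's own statement) =====
-- stated objective: alternative
-- what changed: B replaces A's three materialized length-n guess lists and three separate comparison passes with a frequency dictionary keyed by (i % 40, answer) built in one pass (40 = lcm of the pattern periods), and scores each guesser by summing that table over the 40 residues at the guesser's expected value; no per-guesser scan of the answers remains.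
import Mathlib
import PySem

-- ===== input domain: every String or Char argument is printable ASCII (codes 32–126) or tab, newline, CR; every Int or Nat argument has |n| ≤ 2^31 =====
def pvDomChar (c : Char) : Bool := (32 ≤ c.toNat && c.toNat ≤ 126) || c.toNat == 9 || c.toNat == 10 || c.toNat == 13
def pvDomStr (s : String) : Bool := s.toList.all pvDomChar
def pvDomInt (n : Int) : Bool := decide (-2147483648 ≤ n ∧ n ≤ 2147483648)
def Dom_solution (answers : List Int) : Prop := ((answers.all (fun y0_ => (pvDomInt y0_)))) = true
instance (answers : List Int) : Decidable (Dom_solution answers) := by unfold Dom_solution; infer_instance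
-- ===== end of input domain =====

-- B replaces A's three materialized length-n guess lists and three comparison passes with a
-- frequency dictionary keyed by (i % 40, answer) built in one pass, scored by summing 40 residues per guesser.

-- ===== PORT A =====
-- helper compareAnswer(list, answer, n)
def compareAnswer (l : List Int) (answer : List Int) (n : Int) : Int :=
  (PySem.List.pyRange 0 n 1).foldl
    (fun count i => if PySem.List.pyGet? l i = PySem.List.pyGet? answer i then count + 1 else count) 0

-- the 'while length > 0' loop filling fail_1 with 1..5 blocks (length drops by 5 each outer pass)
def buildFail1 (length : Int) (acc : List Int) : List Int :=
  if 0 < length then buildFail1 (length - 5) (acc ++ [1, 2, 3, 4, 5]) else acc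
termination_by length.toNat
decreasing_by omega

-- one iteration of the fail_2 'for' loop body
def fail2Step (acc : List Int) (i : Int) : List Int :=
  if PySem.Int.mod i 8 = 0 ∨ PySem.Int.mod i 8 = 2 ∨ PySem.Int.mod i 8 = 4 ∨ PySem.Int.mod i 8 = 6 ∨ i = 0 then acc ++ [2]
  else if PySem.Int.mod i 8 = 1 then acc ++ [1]
  else if PySem.Int.mod i 8 = 3 then acc ++ [3]
  else if PySem.Int.mod i 8 = 5 then acc ++ [4]
  else acc ++ [5]

-- one iteration of the fail_3 'for' loop body
def fail3Step (acc : List Int) (i : Int) : List Int :=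
  if i = 0 ∨ PySem.Int.mod i 10 = 0 ∨ PySem.Int.mod i 10 = 1 then acc ++ [3]
  else if PySem.Int.mod i 10 = 2 ∨ PySem.Int.mod i 10 = 3 then acc ++ [1]
  else if PySem.Int.mod i 10 = 4 ∨ PySem.Int.mod i 10 = 5 then acc ++ [2]
  else if PySem.Int.mod i 10 = 6 ∨ PySem.Int.mod i 10 = 7 then acc ++ [4]
  else acc ++ [5]

def solution (answers : List Int) : List Int :=
  let length : Int := answers.length
  let fail1 := buildFail1 length []
  let fail2 := (PySem.List.pyRange 0 length 1).foldl fail2Step []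
  let fail3 := (PySem.List.pyRange 0 length 1).foldl fail3Step []
  let correct1 := compareAnswer fail1 answers answers.length
  let correct2 := compareAnswer fail2 answers answers.length
  let correct3 := compareAnswer fail3 answers answers.length
  -- max(res) on the nonempty 3-element list; .getD 0 is never used
  let maximum := (PySem.List.max? [correct1, correct2, correct3] (fun x => x)).getD 0
  let answer : List Int := if correct1 = maximum then [1] else []
  let answer := if correct2 = maximum then answer ++ [2] else answer
  let answer := if correct3 = maximum then answer ++ [3] else answer
  answer

-- ===== PORT B =====
def solution_alt (answers : List Int) : List Int :=
  -- freq[(i % 40, a)] += 1 over enumerate(answers)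
  let freq := (PySem.List.enumerate answers 0).foldl
    (fun (d : PySem.Dict (Int × Int) Int) p =>
      let k := (PySem.Int.mod p.1 40, p.2)
      d.insert k (d.getD k 0 + 1)) PySem.Dict.empty
  let pats : List (List Int) := [[1, 2, 3, 4, 5], [2, 1, 2, 3, 2, 4, 2, 5], [3, 3, 1, 1, 2, 2, 4, 4, 5, 5]]
  -- scores = [sum(freq.get((r, p[r % len(p)]), 0) for r in range(40)) for p in pats]
  let scores := pats.map (fun p =>
    (PySem.List.pyRange 0 40 1).foldl
      (fun s r => s + freq.getD (r, PySem.List.pyGetD p (PySem.Int.mod r (PySem.List.len p)) 0) 0) 0)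
  let m := (PySem.List.max? scores (fun x => x)).getD 0
  ((PySem.List.pyRange 0 3 1).filter (fun g => PySem.List.pyGetD scores g 0 = m)).map (fun g => g + 1)

-- ===== PRECONDITION & SPEC =====
def Spec_solution (answers : List Int) (out : List Int) : Prop := out = solution_alt answers
instance (answers : List Int) (out : List Int) : Decidable (Spec_solution answers out) := by unfold Spec_solution; infer_instance

-- ===== CLAIM (what is proved, stated in full; the proofs are below) =====
def Claim_equal_solution : Prop := ∀ (answers : List Int), Dom_solution answers → Spec_solution answers (solution answers)

-- ===== LEMMAS AND PROOFS =====

def pvP1 : List Int := [1, 2, 3, 4, 5]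
def pvP2 : List Int := [2, 1, 2, 3, 2, 4, 2, 5]
def pvP3 : List Int := [3, 3, 1, 1, 2, 2, 4, 4, 5, 5]

-- count of positions where answers[k] equals f(k)
def cntF (f : Int → Int) (answers : List Int) : Int :=
  (PySem.List.enumerate answers 0).foldl (fun c p => c + (if p.2 = f p.1 then 1 else 0)) 0

-- the value the fail_2 loop body appends at index i
def g2 (i : Int) : Int :=
  if PySem.Int.mod i 8 = 0 ∨ PySem.Int.mod i 8 = 2 ∨ PySem.Int.mod i 8 = 4 ∨ PySem.Int.mod i 8 = 6 ∨ i = 0 then 2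
  else if PySem.Int.mod i 8 = 1 then 1
  else if PySem.Int.mod i 8 = 3 then 3
  else if PySem.Int.mod i 8 = 5 then 4
  else 5

-- the value the fail_3 loop body appends at index i
def g3 (i : Int) : Int :=
  if i = 0 ∨ PySem.Int.mod i 10 = 0 ∨ PySem.Int.mod i 10 = 1 then 3
  else if PySem.Int.mod i 10 = 2 ∨ PySem.Int.mod i 10 = 3 then 1
  else if PySem.Int.mod i 10 = 4 ∨ PySem.Int.mod i 10 = 5 then 2
  else if PySem.Int.mod i 10 = 6 ∨ PySem.Int.mod i 10 = 7 then 4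
  else 5

lemma fail2Step_eq (acc : List Int) (i : Int) : fail2Step acc i = acc ++ [g2 i] := by
  unfold fail2Step g2; split_ifs <;> rfl

lemma fail3Step_eq (acc : List Int) (i : Int) : fail3Step acc i = acc ++ [g3 i] := by
  unfold fail3Step g3; split_ifs <;> rfl

lemma g2_eq (k : Nat) : g2 (k : Int) = pvP2.getD (k % 8) 0 := by
  have h8 : k % 8 = 0 ∨ k % 8 = 1 ∨ k % 8 = 2 ∨ k % 8 = 3 ∨ k % 8 = 4 ∨ k % 8 = 5 ∨ k % 8 = 6 ∨ k % 8 = 7 := by omega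
  have hm : PySem.Int.mod (k : Int) 8 = ((k % 8 : Nat) : Int) := PySem.Int.mod_natCast k 8
  rcases h8 with h | h | h | h | h | h | h | h <;> rw [g2, hm, h] <;>
    (norm_num [pvP2, Nat.cast_eq_zero] <;> omega)

lemma g3_eq (k : Nat) : g3 (k : Int) = pvP3.getD (k % 10) 0 := by
  have h10 : k % 10 = 0 ∨ k % 10 = 1 ∨ k % 10 = 2 ∨ k % 10 = 3 ∨ k % 10 = 4 ∨ k % 10 = 5 ∨
      k % 10 = 6 ∨ k % 10 = 7 ∨ k % 10 = 8 ∨ k % 10 = 9 := by omega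
  have hm : PySem.Int.mod (k : Int) 10 = ((k % 10 : Nat) : Int) := PySem.Int.mod_natCast k 10
  rcases h10 with h | h | h | h | h | h | h | h | h | h <;> rw [g3, hm, h] <;>
    (norm_num [pvP3, Nat.cast_eq_zero] <;> omega)

lemma buildFail1_eq (L : Int) (acc : List Int) :
    buildFail1 L acc = if 0 < L then buildFail1 (L - 5) (acc ++ [1, 2, 3, 4, 5]) else acc := by
  rw [buildFail1]

lemma buildFail1_acc : ∀ (n : Nat) (L : Int), L.toNat = n → ∀ acc : List Int,
    buildFail1 L acc = acc ++ buildFail1 L [] := by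
  intro n
  induction n using Nat.strong_induction_on with
  | _ n ih =>
    intro L hL acc
    rw [buildFail1_eq L acc, buildFail1_eq L []]
    split_ifs with h
    · rw [ih (L - 5).toNat (by omega) (L - 5) rfl (acc ++ [1, 2, 3, 4, 5]),
          ih (L - 5).toNat (by omega) (L - 5) rfl ([] ++ [1, 2, 3, 4, 5])]
      simp
    · simp

lemma buildFail1_get : ∀ (k : Nat) (L : Int), (k : Int) < L →
    (buildFail1 L [])[k]? = some (pvP1.getD (k % 5) 0) := by
  intro k
  induction k using Nat.strong_induction_on with
  | _ k ih =>
    intro L hkL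
    have hL : 0 < L := by omega
    rw [buildFail1_eq L [], if_pos hL,
        buildFail1_acc (L - 5).toNat (L - 5) rfl ([] ++ [1, 2, 3, 4, 5])]
    simp only [List.nil_append]
    by_cases hk : k < 5
    · rw [List.getElem?_append_left (by simpa using hk)]
      interval_cases k <;> rfl
    · rw [List.getElem?_append_right (by simpa using Nat.le_of_not_lt hk)]
      have := ih (k - 5) (by omega) (L - 5) (by omega)
      simpa [show (k - 5) % 5 = k % 5 by omega] using this

-- A's compareAnswer over range(len(answers)) equals the match count, given the
-- guesser list holds f(k) at every position k below len(answers)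
lemma compare_eq (l answers : List Int) (f : Int → Int)
    (h : ∀ k : Nat, k < answers.length → l[k]? = some (f k)) :
    compareAnswer l answers answers.length = cntF f answers := by
  unfold compareAnswer cntF
  rw [PySem.List.enumerate_eq_map_pyRange (d := 0), List.foldl_map]
  apply PySem.List.foldl_congr_mem
  intro acc i hi
  rw [PySem.List.mem_pyRange_one] at hi
  lift i to ℕ using hi.1 with k
  have hk : k < answers.length := by exact_mod_cast hi.2
  rw [PySem.List.pyGet?_natCast, PySem.List.pyGet?_natCast, h k hk,
      List.getElem?_eq_getElem hk, PySem.List.pyGetD_natCast,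
      List.getD_eq_getElem?_getD, List.getElem?_eq_getElem hk]
  by_cases he : answers[k] = f (k : Int) <;> simp [he, eq_comm] <;> omega

lemma max3_eq (c1 c2 c3 : Int) :
    (PySem.List.max? [c1, c2, c3] (fun x => x)).getD 0 = max c1 (max c2 c3) := by
  rw [PySem.List.max?_id_cons]
  simp [List.foldl_cons, max_assoc]

-- cntF as a countP over enumerate
lemma cntF_eq_countP (f : Int → Int) (answers : List Int) :
    cntF f answers = ((PySem.List.enumerate answers 0).countP (fun p => decide (p.2 = f p.1)) : Int) := by
  unfold cntF
  rw [PySem.List.foldl_add]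
  rw [show (fun (p : Int × Int) => if p.2 = f p.1 then (1 : Int) else 0)
        = (fun p => if (fun (q : Int × Int) => decide (q.2 = f q.1)) p = true then (1 : Int) else 0) by
      funext p; simp]
  rw [PySem.List.sum_map_ite_one_zero]
  simp

-- the 0/1 indicator summed over range(n) hits exactly once, at r = q.1 (if in range and values match)
lemma ind_sum (h : Int → Int) (q : Int × Int) : ∀ (n : Nat),
    ((PySem.List.pyRange 0 (n : Int) 1).map (fun r => if q = (r, h r) then (1 : Int) else 0)).sum
      = if 0 ≤ q.1 ∧ q.1 < (n : Int) ∧ q.2 = h q.1 then 1 else 0 := by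
  intro n
  induction n with
  | zero =>
    rw [show PySem.List.pyRange 0 ((0 : Nat) : Int) 1 = [] from rfl]
    simp only [List.map_nil, List.sum_nil]
    rw [if_neg (by intro hc; exact absurd hc.2.1 (by omega))]
  | succ n ih =>
    rw [show (((n + 1 : Nat)) : Int) = (n : Int) + 1 by push_cast; ring,
        PySem.List.pyRange_one_succ_right (by positivity)]
    rw [List.map_append, List.sum_append, ih]
    simp only [List.map_cons, List.map_nil, List.sum_cons, List.sum_nil, add_zero, Prod.ext_iff]
    by_cases hq1 : q.1 = (n : Int)
    · by_cases hv : q.2 = h q.1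
      · have hc1 : ¬(0 ≤ q.1 ∧ q.1 < (n : Int) ∧ q.2 = h q.1) := by
          intro hc; exact absurd hc.2.1 (by omega)
        have hc2 : q.1 = (n : Int) ∧ q.2 = h (n : Int) := ⟨hq1, by rw [← hq1]; exact hv⟩
        have hc3 : 0 ≤ q.1 ∧ q.1 < (n : Int) + 1 ∧ q.2 = h q.1 := ⟨by omega, by omega, hv⟩
        rw [if_neg hc1, if_pos hc2, if_pos hc3, zero_add]
      · have hc1 : ¬(0 ≤ q.1 ∧ q.1 < (n : Int) ∧ q.2 = h q.1) := fun hc => hv hc.2.2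
        have hc2 : ¬(q.1 = (n : Int) ∧ q.2 = h (n : Int)) := fun hc => hv (by rw [hq1]; exact hc.2)
        have hc3 : ¬(0 ≤ q.1 ∧ q.1 < (n : Int) + 1 ∧ q.2 = h q.1) := fun hc => hv hc.2.2
        rw [if_neg hc1, if_neg hc2, if_neg hc3, add_zero]
    · have hc2 : ¬(q.1 = (n : Int) ∧ q.2 = h (n : Int)) := fun hc => hq1 hc.1
      rw [if_neg hc2, add_zero]
      by_cases hv : q.2 = h q.1
      · have : (0 ≤ q.1 ∧ q.1 < (n : Int) ∧ q.2 = h q.1) ↔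
            (0 ≤ q.1 ∧ q.1 < (n : Int) + 1 ∧ q.2 = h q.1) := by
          constructor <;> rintro ⟨a, b, c⟩ <;> exact ⟨a, by omega, c⟩
        simp only [this]
      · rw [if_neg (fun hc => hv hc.2.2), if_neg (fun hc => hv hc.2.2)]

-- summing per-residue counts over range(40) counts the matching pairs, for pairs with fst in [0, 40)
lemma sum_count_40 (h : Int → Int) : ∀ (M : List (Int × Int)),
    (∀ q ∈ M, 0 ≤ q.1 ∧ q.1 < 40) →
    ((PySem.List.pyRange 0 40 1).map (fun r => ((M.count (r, h r) : Int)))).sum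
      = (M.countP (fun q => decide (q.2 = h q.1)) : Int) := by
  intro M
  induction M with
  | nil => simp
  | cons q M ih =>
    intro hM
    have hq := hM q (List.mem_cons_self)
    have hcnt : ∀ r : Int, ((List.count (r, h r) (q :: M) : Int))
        = (List.count (r, h r) M : Int) + (if q = (r, h r) then (1 : Int) else 0) := by
      intro r
      rw [List.count_cons]
      push_cast
      congr 1
      simp only [beq_iff_eq]
    simp only [hcnt]
    rw [PySem.List.sum_map_add_int, ih (fun p hp => hM p (List.mem_cons_of_mem q hp))]
    have h40 := ind_sum h q 40
    norm_num at h40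
    rw [h40, List.countP_cons]
    have hbig : (0 ≤ q.1 ∧ q.1 < (40 : Int) ∧ q.2 = h q.1) ↔ q.2 = h q.1 := by
      constructor
      · rintro ⟨_, _, c⟩; exact c
      · intro c; exact ⟨hq.1, hq.2, c⟩
    simp only [hbig]
    push_cast
    by_cases hv : q.2 = h q.1 <;> simp [hv]

-- B's per-guesser score equals the match count against pat repeated with its period,
-- provided the period divides 40
lemma score_eq (pat : List Int) (answers : List Int) (hper : pat.length ∣ 40) :
    (PySem.List.pyRange 0 40 1).foldl
      (fun s r => s + (PySem.Dict.counter
          ((PySem.List.enumerate answers 0).map (fun p => (PySem.Int.mod p.1 40, p.2)))).getD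
        (r, PySem.List.pyGetD pat (PySem.Int.mod r (PySem.List.len pat)) 0) 0) 0
    = cntF (fun i => PySem.List.pyGetD pat (PySem.Int.mod i (PySem.List.len pat)) 0) answers := by
  set pg : Int → Int := fun i => PySem.List.pyGetD pat (PySem.Int.mod i (PySem.List.len pat)) 0 with hpg
  set M := (PySem.List.enumerate answers 0).map (fun p => (PySem.Int.mod p.1 40, p.2)) with hM
  rw [PySem.List.foldl_add]
  simp only [PySem.Dict.getD_counter]
  rw [sum_count_40 pg M (by
    intro q hq
    rw [hM, List.mem_map] at hq
    obtain ⟨p, _, rfl⟩ := hq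
    exact ⟨PySem.Int.mod_nonneg p.1 (by norm_num), PySem.Int.mod_lt p.1 (by norm_num)⟩)]
  rw [hM, List.countP_map, cntF_eq_countP, zero_add]
  norm_cast
  apply List.countP_congr
  intro p hp
  rw [PySem.List.mem_enumerate_iff] at hp
  obtain ⟨k, hk, rfl⟩ := hp
  simp only [Function.comp_apply, decide_eq_true_eq, zero_add]
  have hmod40 : PySem.Int.mod (k : Int) 40 = ((k % 40 : Nat) : Int) := PySem.Int.mod_natCast k 40
  have hlen : PySem.List.len pat = (pat.length : Int) := PySem.List.len_eq pat
  have hmm : PySem.Int.mod ((k % 40 : Nat) : Int) (pat.length : Int)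
      = PySem.Int.mod (k : Int) (pat.length : Int) := by
    rw [PySem.Int.mod_natCast, PySem.Int.mod_natCast, Nat.mod_mod_of_dvd k hper]
  rw [hpg]
  simp only [hlen, hmod40, hmm]

lemma solution_eq_alt (answers : List Int) : solution answers = solution_alt answers := by
  -- A-side: the three guess lists hold the periodic values
  have hget2 : ∀ k : Nat, k < answers.length →
      ((PySem.List.pyRange 0 (answers.length : Int) 1).foldl fail2Step [])[k]? =
        some ((fun i => PySem.List.pyGetD pvP2 (PySem.Int.mod i 8) 0) (k : Int)) := by
    intro k hk
    rw [PySem.List.foldl_congr_mem _ fail2Step (fun acc x => acc ++ [g2 x]) []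
          (fun acc x _ => fail2Step_eq acc x),
        PySem.List.foldl_append_singleton_eq_map, List.nil_append,
        PySem.List.getElem?_map_pyRange_zero g2 answers.length k hk]
    rw [g2_eq]
    have hm : PySem.Int.mod (k : Int) 8 = ((k % 8 : Nat) : Int) := PySem.Int.mod_natCast k 8
    simp only [hm, PySem.List.pyGetD_natCast, List.getD]
  have hget3 : ∀ k : Nat, k < answers.length →
      ((PySem.List.pyRange 0 (answers.length : Int) 1).foldl fail3Step [])[k]? =
        some ((fun i => PySem.List.pyGetD pvP3 (PySem.Int.mod i 10) 0) (k : Int)) := by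
    intro k hk
    rw [PySem.List.foldl_congr_mem _ fail3Step (fun acc x => acc ++ [g3 x]) []
          (fun acc x _ => fail3Step_eq acc x),
        PySem.List.foldl_append_singleton_eq_map, List.nil_append,
        PySem.List.getElem?_map_pyRange_zero g3 answers.length k hk]
    rw [g3_eq]
    have hm : PySem.Int.mod (k : Int) 10 = ((k % 10 : Nat) : Int) := PySem.Int.mod_natCast k 10
    simp only [hm, PySem.List.pyGetD_natCast, List.getD]
  have hget1 : ∀ k : Nat, k < answers.length →
      (buildFail1 (answers.length : Int) [])[k]? =
        some ((fun i => PySem.List.pyGetD pvP1 (PySem.Int.mod i 5) 0) (k : Int)) := by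
    intro k hk
    rw [buildFail1_get k (answers.length : Int) (by exact_mod_cast hk)]
    have hm : PySem.Int.mod (k : Int) 5 = ((k % 5 : Nat) : Int) := PySem.Int.mod_natCast k 5
    simp only [hm, PySem.List.pyGetD_natCast, List.getD]
  -- B-side: freq is the counter of (i % 40, a) pairs
  have hfreq : (PySem.List.enumerate answers 0).foldl
      (fun (d : PySem.Dict (Int × Int) Int) p =>
        let k := (PySem.Int.mod p.1 40, p.2)
        d.insert k (d.getD k 0 + 1)) PySem.Dict.empty
      = PySem.Dict.counter ((PySem.List.enumerate answers 0).map (fun p => (PySem.Int.mod p.1 40, p.2))) := by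
    rw [← PySem.Dict.foldl_insert_getD_add_one_eq_counter, List.foldl_map]
  unfold solution solution_alt
  simp only [hfreq, List.map_cons, List.map_nil]
  rw [compare_eq (buildFail1 (answers.length : Int) []) answers
        (fun i => PySem.List.pyGetD pvP1 (PySem.Int.mod i 5) 0) hget1,
      compare_eq ((PySem.List.pyRange 0 (answers.length : Int) 1).foldl fail2Step []) answers
        (fun i => PySem.List.pyGetD pvP2 (PySem.Int.mod i 8) 0) hget2,
      compare_eq ((PySem.List.pyRange 0 (answers.length : Int) 1).foldl fail3Step []) answers
        (fun i => PySem.List.pyGetD pvP3 (PySem.Int.mod i 10) 0) hget3,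
      score_eq ([1, 2, 3, 4, 5] : List Int) answers (by norm_num),
      score_eq ([2, 1, 2, 3, 2, 4, 2, 5] : List Int) answers (by norm_num),
      score_eq ([3, 3, 1, 1, 2, 2, 4, 4, 5, 5] : List Int) answers (by norm_num)]
  simp only [show PySem.List.len ([1, 2, 3, 4, 5] : List Int) = 5 from rfl,
             show PySem.List.len ([2, 1, 2, 3, 2, 4, 2, 5] : List Int) = 8 from rfl,
             show PySem.List.len ([3, 3, 1, 1, 2, 2, 4, 4, 5, 5] : List Int) = 10 from rfl]
  simp only [show ([1, 2, 3, 4, 5] : List Int) = pvP1 from rfl,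
             show ([2, 1, 2, 3, 2, 4, 2, 5] : List Int) = pvP2 from rfl,
             show ([3, 3, 1, 1, 2, 2, 4, 4, 5, 5] : List Int) = pvP3 from rfl]
  rw [max3_eq]
  set c1 := cntF (fun i => PySem.List.pyGetD pvP1 (PySem.Int.mod i 5) 0) answers with hc1
  set c2 := cntF (fun i => PySem.List.pyGetD pvP2 (PySem.Int.mod i 8) 0) answers with hc2
  set c3 := cntF (fun i => PySem.List.pyGetD pvP3 (PySem.Int.mod i 10) 0) answers with hc3
  set m := max c1 (max c2 c3) with hm
  have hrange : PySem.List.pyRange 0 3 1 = [0, 1, 2] := by decide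
  have e0 : PySem.List.pyGetD [c1, c2, c3] (0 : Int) 0 = c1 := rfl
  have e1 : PySem.List.pyGetD [c1, c2, c3] (1 : Int) 0 = c2 := rfl
  have e2 : PySem.List.pyGetD [c1, c2, c3] (2 : Int) 0 = c3 := rfl
  rw [hrange]
  simp only [List.filter_cons, List.filter_nil, e0, e1, e2]
  by_cases h1 : c1 = m <;> by_cases h2 : c2 = m <;> by_cases h3 : c3 = m <;>
    simp [h1, h2, h3]

-- ===== VERDICT (by name: the statement is the Claim_ definition above) =====
theorem solution_spec : Claim_equal_solution := by
  intro answers _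
  exact solution_eq_alt answers
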